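-- pv_equiv track=rewrite | github.com/ninono12345/betting | main_code.py | create_timeline_from_parsed_events
-- ===== SOURCE A (Python) =====
-- from collections import defaultdict
--
-- def create_timeline_from_parsed_events(events):
--     """
--     Organizes a list of parsed events into a structured timeline.
--
--     The timeline groups events by action type (goals, corners, etc.) and then
--     by the team that performed the action. Event times are converted to integers
--     and sorted.
--
--     Args:
--         events (list): A list of event dictionaries, typically from the
--                        parse_match_events_from_html function.
--
--     Returns:
--         dict: A dictionary where keys are action types (e.g., 'goals').
--               Each action type contains another dictionary with team names as
--               keys and lists of sorted integer event times as values.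
--     """
--     timeline = {
--         'goals': defaultdict(list),
--         'corners': defaultdict(list),
--         'yellow_cards': defaultdict(list),
--         'red_cards': defaultdict(list)
--     }
--
--     key_map = {
--         'goal': 'goals',
--         'corner': 'corners',
--         'yellow_card': 'yellow_cards',
--         'red_card': 'red_cards'
--     }
--
--     for event in events:
--         event_type = event.get('event_type')
--         team = event.get('team')
--         time_str = event.get('time')
--
--         timeline_key = key_map.get(event_type)
--
--         if timeline_key and team and time_str:
--             # Handle stoppage time like '45+2' and convert to integer
--             try:
--                 if '+' in time_str:
--                     parts = time_str.split('+')
--                     time_int = int(parts[0]) + int(parts[1])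
--                 else:
--                     time_int = int(time_str)
--                 timeline[timeline_key][team].append(time_int)
--             except (ValueError, IndexError):
--                 # Skip if time format is unexpected
--                 continue
--
--     # Sort the times for each team within each event type
--     for action_type in timeline.values():
--         for team_times in action_type.values():
--             team_times.sort()
--
--     # Convert defaultdicts to regular dicts for a cleaner final output
--     return {
--         'goals': dict(timeline['goals']),
--         'corners': dict(timeline['corners']),
--         'yellow_cards': dict(timeline['yellow_cards']),
--         'red_cards': dict(timeline['red_cards'])
--     }
-- ===== SOURCE B (Python) =====
-- def _time_int(time_str):
--     """The same stoppage-time parse A performs: '45+2' -> 47; None on bad format."""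
--     try:
--         if '+' in time_str:
--             parts = time_str.split('+')
--             return int(parts[0]) + int(parts[1])
--         return int(time_str)
--     except (ValueError, IndexError):
--         return None
--
--
-- def create_timeline_from_parsed_events(events):
--     key_map = {
--         'goal': 'goals',
--         'corner': 'corners',
--         'yellow_card': 'yellow_cards',
--         'red_card': 'red_cards'
--     }
--
--     def parse(event):
--         """Return (timeline_key, team, time_int) or None if the event is skipped."""
--         key = key_map.get(event.get('event_type'))
--         team = event.get('team')
--         time_str = event.get('time')
--         if not (key and team and time_str):
--             return None
--         t = _time_int(time_str)
--         if t is None: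
--             return None
--         return (key, team, t)
--
--     parsed = [p for p in map(parse, events) if p is not None]
--     return {
--         key: {team: sorted(t for k2, tm, t in parsed if k2 == key and tm == team)
--               for team in dict.fromkeys(tm for k2, tm, _ in parsed if k2 == key)}
--         for key in ('goals', 'corners', 'yellow_cards', 'red_cards')
--     }
-- ===== Notes on version B (the rewrite author's own statement) =====
-- stated objective: alternative
-- what changed: A mutates nested defaultdicts per event and then sorts every bucket in place; B parses each event once into (key, team, time) triples and builds each of the four buckets as a pure filter/group-by comprehension over that flat list (no mutation, no defaultdict).
import Mathlib
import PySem

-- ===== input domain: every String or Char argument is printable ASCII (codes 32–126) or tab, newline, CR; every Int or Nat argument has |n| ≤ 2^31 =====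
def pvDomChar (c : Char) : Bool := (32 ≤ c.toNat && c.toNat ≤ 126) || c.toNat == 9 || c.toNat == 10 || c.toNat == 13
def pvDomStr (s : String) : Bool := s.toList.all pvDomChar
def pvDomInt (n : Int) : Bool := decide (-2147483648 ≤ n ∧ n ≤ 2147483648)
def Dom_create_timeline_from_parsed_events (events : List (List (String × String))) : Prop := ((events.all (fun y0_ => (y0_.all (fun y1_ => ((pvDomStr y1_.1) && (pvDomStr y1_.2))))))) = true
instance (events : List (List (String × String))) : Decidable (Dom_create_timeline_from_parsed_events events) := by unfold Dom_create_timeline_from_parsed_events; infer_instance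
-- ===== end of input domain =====

-- B replaces A's mutate-nested-defaultdicts-then-sort-each-bucket loop by a pure pipeline:
-- parse every event once into (key, team, time) triples, then build each bucket by
-- filtering/grouping comprehensions (objective: alternative; same asymptotic cost on
-- realistic inputs, no claim of speed).

-- ===== PORT A =====

-- key_map (shared literal table of both Pythons)
def pvKeyMap : PySem.Dict String String :=
  PySem.Dict.ofList [("goal","goals"),("corner","corners"),("yellow_card","yellow_cards"),("red_card","red_cards")]

-- key_map.get(event_type) where event_type may be None (both Pythons perform this same lookup)
def pvKeyGet (o : Option String) : Option String :=
  match o with | some et => pvKeyMap.get? et | none => none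

-- the try-block both Pythons share: '45+2' handling; none = ValueError/IndexError (caught → skip)
def pvTimeInt (ts : String) : Option Int :=
  if PySem.Str.isIn "+" ts then
    match PySem.Str.split? ts "+" with
    | some parts =>
      match PySem.List.pyGet? parts 0, PySem.List.pyGet? parts 1 with
      | some p0, some p1 =>
        match PySem.Int.ofStr? p0, PySem.Int.ofStr? p1 with
        | some a, some b => some (a + b)
        | _, _ => none
      | _, _ => none
    | none => none
  else PySem.Int.ofStr? ts

-- A's loop body; state = the four defaultdicts (goals, corners, yellow_cards, red_cards)
def pvStepA
    (s : PySem.Dict String (List Int) × PySem.Dict String (List Int) × PySem.Dict String (List Int) × PySem.Dict String (List Int))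
    (event : List (String × String)) :
    PySem.Dict String (List Int) × PySem.Dict String (List Int) × PySem.Dict String (List Int) × PySem.Dict String (List Int) :=
  let ev := PySem.Dict.ofList event
  let event_type := ev.get? "event_type"
  let team := ev.get? "team"
  let time_str := ev.get? "time"
  let timeline_key := pvKeyGet event_type
  match timeline_key, team, time_str with
  | some k, some tm, some ts =>
    if k ≠ "" ∧ tm ≠ "" ∧ ts ≠ "" then
      match pvTimeInt ts with
      | some t =>
        -- timeline[timeline_key][team].append(time_int); key_map only yields these four keys
        if k = "goals" then (s.1.modify tm [] (· ++ [t]), s.2.1, s.2.2.1, s.2.2.2)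
        else if k = "corners" then (s.1, s.2.1.modify tm [] (· ++ [t]), s.2.2.1, s.2.2.2)
        else if k = "yellow_cards" then (s.1, s.2.1, s.2.2.1.modify tm [] (· ++ [t]), s.2.2.2)
        else if k = "red_cards" then (s.1, s.2.1, s.2.2.1, s.2.2.2.modify tm [] (· ++ [t]))
        else s
      | none => s
    else s
  | _, _, _ => s

-- the final per-team in-place sort + dict() conversion of one action type
def pvSortVals (d : PySem.Dict String (List Int)) : List (String × List Int) :=
  d.items.map (fun p => (p.1, PySem.List.sorted p.2 (fun x => x) false))

def create_timeline_from_parsed_events (events : List (List (String × String))) : List (String × List (String × List Int)) :=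
  let t := events.foldl pvStepA (PySem.Dict.empty, PySem.Dict.empty, PySem.Dict.empty, PySem.Dict.empty)
  [("goals", pvSortVals t.1), ("corners", pvSortVals t.2.1),
   ("yellow_cards", pvSortVals t.2.2.1), ("red_cards", pvSortVals t.2.2.2)]

-- ===== PORT B =====

-- Source B's parse(event): Some (timeline_key, team, time_int), or none if the event is skipped
def pvParse (event : List (String × String)) : Option (String × String × Int) :=
  let ev := PySem.Dict.ofList event
  let key := pvKeyGet (ev.get? "event_type")
  match key, ev.get? "team", ev.get? "time" with
  | some k, some tm, some ts =>
    if k ≠ "" ∧ tm ≠ "" ∧ ts ≠ "" then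
      match pvTimeInt ts with
      | some t => some (k, tm, t)
      | none => none
    else none
  | _, _, _ => none

-- one bucket of the result: group the parsed triples of one key by team (first-occurrence order)
def pvBucket (parsed : List (String × String × Int)) (key : String) : List (String × List Int) :=
  (PySem.List.dedup ((parsed.filter (fun p => p.1 == key)).map (fun p => p.2.1))).map
    (fun team =>
      (team, PySem.List.sorted ((parsed.filter (fun p => p.1 == key && p.2.1 == team)).map (fun p => p.2.2)) (fun x => x) false))

def create_timeline_from_parsed_events_alt (events : List (List (String × String))) : List (String × List (String × List Int)) :=
  let parsed := (events.map pvParse).filterMap id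
  [("goals", pvBucket parsed "goals"), ("corners", pvBucket parsed "corners"),
   ("yellow_cards", pvBucket parsed "yellow_cards"), ("red_cards", pvBucket parsed "red_cards")]

-- ===== PRECONDITION & SPEC =====
def Spec_create_timeline_from_parsed_events (events : List (List (String × String))) (out : List (String × List (String × List Int))) : Prop := out = create_timeline_from_parsed_events_alt events
instance (events : List (List (String × String))) (out : List (String × List (String × List Int))) : Decidable (Spec_create_timeline_from_parsed_events events out) := by unfold Spec_create_timeline_from_parsed_events; infer_instance

-- ===== CLAIM (what is proved, stated in full; the proofs are below) =====
def Claim_equal_create_timeline_from_parsed_events : Prop := ∀ (events : List (List (String × String))), Dom_create_timeline_from_parsed_events events → Spec_create_timeline_from_parsed_events events (create_timeline_from_parsed_events events)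

-- ===== LEMMAS AND PROOFS =====

-- proof-only view of A's loop body: apply one parsed triple to the four-dict state
def pvAdd
    (s : PySem.Dict String (List Int) × PySem.Dict String (List Int) × PySem.Dict String (List Int) × PySem.Dict String (List Int))
    (p : String × String × Int) :
    PySem.Dict String (List Int) × PySem.Dict String (List Int) × PySem.Dict String (List Int) × PySem.Dict String (List Int) :=
  if p.1 = "goals" then (s.1.modify p.2.1 [] (· ++ [p.2.2]), s.2.1, s.2.2.1, s.2.2.2)
  else if p.1 = "corners" then (s.1, s.2.1.modify p.2.1 [] (· ++ [p.2.2]), s.2.2.1, s.2.2.2)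
  else if p.1 = "yellow_cards" then (s.1, s.2.1, s.2.2.1.modify p.2.1 [] (· ++ [p.2.2]), s.2.2.2)
  else if p.1 = "red_cards" then (s.1, s.2.1, s.2.2.1, s.2.2.2.modify p.2.1 [] (· ++ [p.2.2]))
  else s

-- L1: A's loop body is B's parse followed by pvAdd
theorem stepA_eq_parse (s : PySem.Dict String (List Int) × PySem.Dict String (List Int) × PySem.Dict String (List Int) × PySem.Dict String (List Int)) (event : List (String × String)) :
    pvStepA s event = match pvParse event with | none => s | some p => pvAdd s p := by
  simp only [pvStepA, pvParse]
  cases hkg : pvKeyGet ((PySem.Dict.ofList event).get? "event_type") with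
  | none =>
    cases htm : (PySem.Dict.ofList event).get? "team" <;>
    cases hts : (PySem.Dict.ofList event).get? "time" <;> rfl
  | some k =>
    cases htm : (PySem.Dict.ofList event).get? "team" <;>
    cases hts : (PySem.Dict.ofList event).get? "time" <;> try rfl
    rename_i tm ts
    by_cases hc : (k ≠ "" ∧ tm ≠ "" ∧ ts ≠ "")
    · simp only [if_pos hc]
      cases ht : pvTimeInt ts
      · rfl
      · simp [pvAdd]
    · simp only [if_neg hc]

-- L2: the whole loop of A is a fold of pvAdd over B's parsed list
theorem foldA_eq (events : List (List (String × String))) (s : PySem.Dict String (List Int) × PySem.Dict String (List Int) × PySem.Dict String (List Int) × PySem.Dict String (List Int)) :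
    events.foldl pvStepA s = ((events.map pvParse).filterMap id).foldl pvAdd s := by
  induction events generalizing s with
  | nil => rfl
  | cons e rest ih =>
    simp only [List.foldl_cons, List.map_cons, List.filterMap_cons, stepA_eq_parse]
    cases h : pvParse e <;> simp [ih]

def pvSel (l : List (String × String × Int)) (key : String) : List (String × Int) :=
  (l.filter (fun p => p.1 == key)).map (fun p => p.2)

def pvGroup (d : PySem.Dict String (List Int)) (l : List (String × Int)) : PySem.Dict String (List Int) :=
  l.foldl (fun d p => d.modify p.1 [] (· ++ [p.2])) d

-- L3: componentwise, the fold of pvAdd groups each key's pairs separately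
theorem foldAdd_components (l : List (String × String × Int))
    (g c y r : PySem.Dict String (List Int)) :
    l.foldl pvAdd (g, c, y, r) =
      (pvGroup g (pvSel l "goals"), pvGroup c (pvSel l "corners"),
       pvGroup y (pvSel l "yellow_cards"), pvGroup r (pvSel l "red_cards")) := by
  induction l generalizing g c y r with
  | nil => rfl
  | cons p rest ih =>
    obtain ⟨k, tm, t⟩ := p
    have hsel : ∀ key : String, pvSel ((k, tm, t) :: rest) key =
        if k == key then (tm, t) :: pvSel rest key else pvSel rest key := by
      intro key; by_cases h : (k == key) = true <;> simp [pvSel, h]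
    simp only [List.foldl_cons, pvAdd]
    split_ifs with h1 h2 h3 h4
    · subst h1; rw [ih]; simp [hsel, pvGroup]
    · subst h2; rw [ih]; simp [hsel, pvGroup]
    · subst h3; rw [ih]; simp [hsel, pvGroup]
    · subst h4; rw [ih]; simp [hsel, pvGroup]
    · rw [ih]; simp [hsel, pvGroup, h1, h2, h3, h4]

-- ordered-dedup of a list extended by one element
theorem dedup_append_singleton {α : Type} [BEq α] [LawfulBEq α] (ys : List α) (a : α) :
    PySem.List.dedup (ys ++ [a]) =
      if a ∈ ys then PySem.List.dedup ys else PySem.List.dedup ys ++ [a] := by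
  have hmm : a ∈ PySem.Set.ofList ys ↔ a ∈ ys := PySem.Set.mem_ofList ys a
  by_cases h : a ∈ ys
  · rw [if_pos h, PySem.List.dedup_eq_ofList, PySem.List.dedup_eq_ofList,
      PySem.Set.ofList_append_singleton]
    exact PySem.Set.add_of_mem (hmm.mpr h)
  · rw [if_neg h, PySem.List.dedup_eq_ofList, PySem.List.dedup_eq_ofList,
      PySem.Set.ofList_append_singleton]
    exact PySem.Set.add_of_not_mem (fun hx => h (hmm.mp hx))

-- L4: the items of a grouping fold, in first-occurrence team order
theorem items_group (l : List (String × Int)) :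
    (pvGroup PySem.Dict.empty l).items =
      (PySem.List.dedup (l.map (fun p => p.1))).map
        (fun tm => (tm, (l.filter (fun p => p.1 == tm)).map (fun p => p.2))) := by
  induction l using List.reverseRecOn with
  | nil => rfl
  | append_singleton l x ih =>
    obtain ⟨a, t⟩ := x
    have hfold : pvGroup PySem.Dict.empty (l ++ [(a, t)]) =
        (pvGroup PySem.Dict.empty l).insert a ((pvGroup PySem.Dict.empty l).getD a [] ++ [t]) := by
      simp [pvGroup, List.foldl_append, PySem.Dict.modify]
    have hkeys : (pvGroup PySem.Dict.empty l).keys = PySem.List.dedup (l.map (fun p => p.1)) := by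
      rw [PySem.Dict.keys, ih, List.map_map]
      simp [Function.comp_def]
    have hget : (pvGroup PySem.Dict.empty l).getD a [] =
        (l.filter (fun p => p.1 == a)).map (fun p => p.2) := by
      simpa [pvGroup] using PySem.Dict.getD_foldl_modify_append l PySem.Dict.empty a
    rw [hfold, hget]
    by_cases hmem : a ∈ l.map (fun p => p.1)
    · have hcont : (pvGroup PySem.Dict.empty l).contains a = true := by
        rw [PySem.Dict.contains_eq_decide_mem_keys, hkeys]
        simp [hmem]
      rw [PySem.Dict.items_insert_of_contains _ _ hcont, ih]
      simp only [List.map_append, List.map_cons, List.map_nil]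
      rw [dedup_append_singleton, if_pos hmem, List.map_map]
      refine List.map_congr_left ?_
      intro tm htm
      by_cases h : tm = a
      · subst h; simp [List.filter_append]
      · simp [List.filter_append, h, Ne.symm h]
    · have hcont : (pvGroup PySem.Dict.empty l).contains a = false := by
        rw [PySem.Dict.contains_eq_decide_mem_keys, hkeys]
        simp [hmem]
      rw [PySem.Dict.items_insert_of_not_contains _ _ hcont, ih]
      simp only [List.map_append, List.map_cons, List.map_nil]
      rw [dedup_append_singleton, if_neg hmem, List.map_append]
      have hnil : l.filter (fun p => p.1 == a) = [] := by
        rw [List.filter_eq_nil_iff]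
        intro p hp hpa
        exact hmem (List.mem_map.mpr ⟨p, hp, by simpa using hpa⟩)
      rw [hnil]
      congr 1
      · refine List.map_congr_left ?_
        intro tm htm
        have hne : a ≠ tm := by
          rintro rfl
          exact hmem ((PySem.List.mem_dedup _ _).mp htm)
        simp [List.filter_append, hne]
      · simp [List.filter_append, hnil]

-- L5: sorting each bucket of the grouped selection gives B's bucket
theorem sortVals_group (parsed : List (String × String × Int)) (key : String) :
    pvSortVals (pvGroup PySem.Dict.empty (pvSel parsed key)) = pvBucket parsed key := by
  simp only [pvSortVals, items_group, pvBucket, List.map_map]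
  have hK : (pvSel parsed key).map (fun p : String × Int => p.1)
      = (parsed.filter (fun p => p.1 == key)).map (fun p => p.2.1) := by
    simp [pvSel, List.map_map, Function.comp_def]
  rw [hK]
  refine List.map_congr_left ?_
  intro tm htm
  have hv : ((pvSel parsed key).filter (fun p => p.1 == tm)).map (fun p : String × Int => p.2)
      = (parsed.filter (fun p => p.1 == key && p.2.1 == tm)).map (fun p => p.2.2) := by
    simp only [pvSel, List.filter_map, List.map_map, List.filter_filter]
    refine congrArg _ (List.filter_congr ?_)
    intro p hp
    simp [Bool.and_comm]
  simp [hv]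

-- ===== VERDICT (by name: the statement is the Claim_ definition above) =====
theorem create_timeline_from_parsed_events_spec : Claim_equal_create_timeline_from_parsed_events := by
  intro events _
  show _ = _
  simp only [create_timeline_from_parsed_events, create_timeline_from_parsed_events_alt,
    foldA_eq, foldAdd_components, sortVals_group]
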